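-- pv_equiv track=rewrite | github.com/gield/aoc2019 | day22/solution1.py | deal_with_increment
-- ===== SOURCE A (Python) =====
-- def deal_with_increment(deck, n):
--     deck_length = len(deck)
--     new_deck = [0] * deck_length
--     i = 0
--     while deck:
--         new_deck[i] = deck.pop(0)
--         i = (i + n) % deck_length
--     return new_deck
-- ===== SOURCE B (Python) =====
-- def deal_with_increment(deck, n):
--     # Direct indexing: element i goes to position (i*n) % len; O(n) instead of
--     # A's quadratic pop(0) loop.  Return-value equivalence only: A empties the
--     # input list in place, B leaves it untouched.
--     deck_length = len(deck)
--     new_deck = [0] * deck_length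
--     for i, card in enumerate(deck):
--         new_deck[(i * n) % deck_length] = card
--     return new_deck
-- ===== Notes on version B (the rewrite author's own statement) =====
-- stated objective: faster
-- what changed: Replaces the while/pop(0) loop with running index i=(i+n)%len by a single enumerate pass writing deck[i] directly to position (i*n)%len, eliminating the O(n) pop(0) shifts.
import Mathlib
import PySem

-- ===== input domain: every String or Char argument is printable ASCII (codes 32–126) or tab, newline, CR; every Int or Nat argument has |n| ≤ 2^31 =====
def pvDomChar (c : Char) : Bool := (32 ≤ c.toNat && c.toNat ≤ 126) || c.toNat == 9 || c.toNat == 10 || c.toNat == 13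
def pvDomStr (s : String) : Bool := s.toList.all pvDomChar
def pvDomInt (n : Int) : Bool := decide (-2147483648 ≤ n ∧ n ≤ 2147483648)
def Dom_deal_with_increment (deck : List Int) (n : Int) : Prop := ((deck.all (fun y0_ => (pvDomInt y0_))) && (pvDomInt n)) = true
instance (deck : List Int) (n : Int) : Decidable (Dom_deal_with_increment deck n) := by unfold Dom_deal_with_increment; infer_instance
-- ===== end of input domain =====

-- B replaces A's quadratic while/pop(0) loop (running index i = (i+n) % len) by one
-- enumerate pass writing deck[i] directly to position (i*n) % len — asymptotically faster.
-- Return-value equivalence only: A empties its input list in place, B leaves it untouched.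

-- ===== PORT A =====
-- while deck: new_deck[i] = deck.pop(0); i = (i + n) % deck_length
def dealIncAuxA (L n : Int) : List Int → List Int → Int → List Int
  | [], new_deck, _ => new_deck
  | c :: rest, new_deck, i =>
      dealIncAuxA L n rest (new_deck.set i.toNat c) (PySem.Int.mod (i + n) L)

def deal_with_increment (deck : List Int) (n : Int) : List Int :=
  let deck_length : Int := deck.length
  dealIncAuxA deck_length n deck (List.replicate deck.length 0) 0

-- ===== PORT B =====
-- for i, card in enumerate(deck): new_deck[(i*n) % deck_length] = card
def deal_with_increment_alt (deck : List Int) (n : Int) : List Int :=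
  let deck_length : Int := deck.length
  deck.zipIdx.foldl
    (fun new_deck p => new_deck.set (PySem.Int.mod ((p.2 : Int) * n) deck_length).toNat p.1)
    (List.replicate deck.length 0)

-- ===== PRECONDITION & SPEC =====
def Spec_deal_with_increment (deck : List Int) (n : Int) (out : List Int) : Prop := out = deal_with_increment_alt deck n
instance (deck : List Int) (n : Int) (out : List Int) : Decidable (Spec_deal_with_increment deck n out) := by unfold Spec_deal_with_increment; infer_instance

-- ===== CLAIM (what is proved, stated in full; the proofs are below) =====
def Claim_equal_deal_with_increment : Prop := ∀ (deck : List Int) (n : Int), Dom_deal_with_increment deck n → Spec_deal_with_increment deck n (deal_with_increment deck n)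

-- ===== LEMMAS AND PROOFS =====

theorem dealInc_loop_eq (L n : Int) (hL : 0 < L) :
    ∀ (rest new_deck : List Int) (k : Nat),
      dealIncAuxA L n rest new_deck (PySem.Int.mod ((k : Int) * n) L)
        = (rest.zipIdx k).foldl
            (fun nd p => nd.set (PySem.Int.mod ((p.2 : Int) * n) L).toNat p.1) new_deck := by
  intro rest
  induction rest with
  | nil => intro new_deck k; simp [dealIncAuxA]
  | cons c rest ih =>
      intro new_deck k
      simp only [dealIncAuxA, List.zipIdx, List.foldl]
      have hstep : PySem.Int.mod (PySem.Int.mod ((k : Int) * n) L + n) L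
          = PySem.Int.mod (((k + 1 : Nat) : Int) * n) L := by
        rw [PySem.Int.mod_eq_emod_of_pos hL, PySem.Int.mod_eq_emod_of_pos hL,
            PySem.Int.mod_eq_emod_of_pos hL, Int.emod_add_emod]
        congr 1
        push_cast
        ring
      rw [hstep, ih]

theorem deal_with_increment_eq_alt (deck : List Int) (n : Int) :
    deal_with_increment deck n = deal_with_increment_alt deck n := by
  cases deck with
  | nil => rfl
  | cons c rest =>
      have hL : (0 : Int) < ((c :: rest).length : Int) := by
        simp
      have h0 : (0 : Int) = PySem.Int.mod (((0 : Nat) : Int) * n) ((c :: rest).length : Int) := by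
        rw [PySem.Int.mod_eq_emod_of_pos hL]
        simp
      unfold deal_with_increment deal_with_increment_alt
      simp only
      rw [h0, dealInc_loop_eq _ n hL]

-- ===== VERDICT (by name: the statement is the Claim_ definition above) =====
theorem deal_with_increment_spec : Claim_equal_deal_with_increment := by
  intro deck n _
  unfold Spec_deal_with_increment
  exact deal_with_increment_eq_alt deck n
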